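-- pv_equiv track=rewrite | github.com/westreed/ProgrammersAlgorithm | Programmers/lv1/모의고사.py | solution
-- ===== SOURCE A (Python) =====
-- class human:
--     def __init__(self, array):
--         self.index = 0
--         self.array = array
--         self.arrlen = len(array)
--         self.answer = 0
--
--     def returnNumber(self, correct):
--         value = self.array[self.index]
--
--         if (self.index == self.arrlen-1):
--             self.index = 0
--         else:
--             self.index = self.index + 1
--
--         if (correct == value):
--             self.answer = self.answer + 1
--
-- def solution(answers):
--     human1 = human([1,2,3,4,5])
--     human2 = human([2,1,2,3,2,4,2,5])
--     human3 = human([3,3,1,1,2,2,4,4,5,5])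
--
--     for ans in answers:
--         human1.returnNumber(ans)
--         human2.returnNumber(ans)
--         human3.returnNumber(ans)
--
--     answerList = [human1.answer, human2.answer, human3.answer]
--     maxScore = 0
--     for i in range(0,3):
--         if(maxScore < answerList[i]):
--             maxScore = answerList[i]
--
--     checkAnswer = []
--     for i in range(0,3):
--         if(maxScore == answerList[i]):
--             checkAnswer.append(i+1)
--     return checkAnswer
-- ===== SOURCE B (Python) =====
-- def solution(answers):
--     # 40 = lcm(5, 8, 10): every pattern's value at position i depends only on i % 40.
--     # Build one histogram of (i % 40, answer) pairs, then score each pattern with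
--     # 40 table lookups instead of matching it against every answer.
--     cnt = {}
--     for i, a in enumerate(answers):
--         key = (i % 40, a)
--         cnt[key] = cnt.get(key, 0) + 1
--     patterns = [[1, 2, 3, 4, 5], [2, 1, 2, 3, 2, 4, 2, 5], [3, 3, 1, 1, 2, 2, 4, 4, 5, 5]]
--     scores = [sum(cnt.get((r, p[r % len(p)]), 0) for r in range(40)) for p in patterns]
--     best = max(scores)
--     return [k + 1 for k, s in enumerate(scores) if s == best]
-- ===== Notes on version B (the rewrite author's own statement) =====
-- stated objective: alternative
-- what changed: Replaces A's per-answer stateful simulation of three wrap-around counter objects by a single histogram of (index mod 40, answer) pairs (40 = lcm of the pattern lengths), from which each pattern's score is read off with 40 table lookups; winners come from max plus an enumerate filter instead of two explicit range(0,3) loops.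
import Mathlib
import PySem

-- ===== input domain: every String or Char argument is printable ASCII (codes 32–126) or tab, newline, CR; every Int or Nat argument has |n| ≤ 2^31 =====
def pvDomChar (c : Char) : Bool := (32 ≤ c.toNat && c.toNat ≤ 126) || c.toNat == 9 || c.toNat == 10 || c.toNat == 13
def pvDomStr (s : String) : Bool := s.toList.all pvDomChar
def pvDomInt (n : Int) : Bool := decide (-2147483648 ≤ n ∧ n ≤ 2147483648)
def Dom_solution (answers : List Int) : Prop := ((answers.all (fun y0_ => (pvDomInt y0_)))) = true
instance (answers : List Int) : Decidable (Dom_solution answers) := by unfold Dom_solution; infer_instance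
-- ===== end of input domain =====

-- B replaces A's per-answer simulation of three stateful wrap-around counters by ONE histogram of
-- (index mod 40, answer) pairs (40 = lcm of the pattern lengths), scored by 40 table lookups per pattern (alternative; same cost).

-- ===== PORT A =====
-- human.returnNumber: reads array[index], wraps index manually, bumps answer on a match.
-- array[self.index] is always in range (index wraps within the array), so pyGetD with
-- default 0 is exact here.
def humanStep (arr : List Int) (st : Int × Int) (ans : Int) : Int × Int :=
  let value := PySem.List.pyGetD arr st.1 0
  let idx' : Int := if st.1 = (arr.length : Int) - 1 then 0 else st.1 + 1
  let answer' : Int := if ans = value then st.2 + 1 else st.2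
  (idx', answer')

def solution (answers : List Int) : List Int :=
  -- the single loop updates the three independent human states in lock-step
  let st := answers.foldl
    (fun s a => (humanStep [1,2,3,4,5] s.1 a,
                 humanStep [2,1,2,3,2,4,2,5] s.2.1 a,
                 humanStep [3,3,1,1,2,2,4,4,5,5] s.2.2 a))
    (((0:Int),(0:Int)), ((0:Int),(0:Int)), ((0:Int),(0:Int)))
  let answerList : List Int := [st.1.2, st.2.1.2, st.2.2.2]
  let maxScore : Int := (PySem.List.pyRange 0 3 1).foldl
    (fun m i => if m < PySem.List.pyGetD answerList i 0 then PySem.List.pyGetD answerList i 0 else m) 0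
  (PySem.List.pyRange 0 3 1).foldl
    (fun acc i => if maxScore = PySem.List.pyGetD answerList i 0 then acc ++ [i + 1] else acc) []

-- ===== PORT B =====
-- cnt[key] = cnt.get(key, 0) + 1 over enumerate(answers); then
-- sum(cnt.get((r, p[r % len(p)]), 0) for r in range(40)); indices are nonnegative so pyGetD is exact.
def solution_alt (answers : List Int) : List Int :=
  let cnt : PySem.Dict (Int × Int) Int := (PySem.List.enumerate answers 0).foldl
    (fun d ia => d.insert (PySem.Int.mod ia.1 40, ia.2) (d.getD (PySem.Int.mod ia.1 40, ia.2) 0 + 1))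
    PySem.Dict.empty
  let scores : List Int := [[1,2,3,4,5], [2,1,2,3,2,4,2,5], [3,3,1,1,2,2,4,4,5,5]].map
    (fun p => ((PySem.List.pyRange 0 40 1).map
      (fun r => cnt.getD (r, PySem.List.pyGetD p (PySem.Int.mod r (p.length : Int)) 0) 0)).sum)
  -- max(scores): scores has three elements, so max() cannot raise; getD 0 is exact.
  let best : Int := (PySem.List.max? scores (fun x => x)).getD 0
  ((PySem.List.enumerate scores 0).filter (fun q => q.2 = best)).map (fun q => q.1 + 1)

-- ===== PRECONDITION & SPEC =====
def Spec_solution (answers : List Int) (out : List Int) : Prop := out = solution_alt answers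
instance (answers : List Int) (out : List Int) : Decidable (Spec_solution answers out) := by unfold Spec_solution; infer_instance

-- ===== CLAIM (what is proved, stated in full; the proofs are below) =====
def Claim_equal_solution : Prop := ∀ (answers : List Int), Dom_solution answers → Spec_solution answers (solution answers)

-- ===== LEMMAS AND PROOFS =====

-- the lock-step triple fold is the product of three independent folds
theorem triple_fold (answers : List Int) (s1 s2 s3 : Int × Int) :
    answers.foldl
      (fun s a => (humanStep [1,2,3,4,5] s.1 a,
                   humanStep [2,1,2,3,2,4,2,5] s.2.1 a,
                   humanStep [3,3,1,1,2,2,4,4,5,5] s.2.2 a))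
      (s1, s2, s3)
    = (answers.foldl (humanStep [1,2,3,4,5]) s1,
       answers.foldl (humanStep [2,1,2,3,2,4,2,5]) s2,
       answers.foldl (humanStep [3,3,1,1,2,2,4,4,5,5]) s3) := by
  induction answers generalizing s1 s2 s3 with
  | nil => rfl
  | cons a rest ih => simp [List.foldl, ih]

theorem succ_mod_wrap (i L : Nat) (hL : 2 ≤ L) :
    ((i + 1) % L : Nat) = if i % L = L - 1 then 0 else i % L + 1 := by
  have hlt : i % L < L := Nat.mod_lt _ (by omega)
  have h1 : (i + 1) % L = (i % L + 1) % L := by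
    conv_lhs => rw [Nat.add_mod]
    rw [Nat.mod_eq_of_lt (show 1 < L by omega)]
  by_cases h : i % L = L - 1
  · simp [h, h1]
    rw [show L - 1 + 1 = L by omega, Nat.mod_self]
  · rw [h1, Nat.mod_eq_of_lt (by omega)]
    simp [h]

-- core invariant: A's stateful wrap-around counter computes the modulo-indexed indicator sum
theorem human_run (arr : List Int) (hL : 2 ≤ arr.length) :
    ∀ (answers : List Int) (i : Nat) (acc : Int),
      (answers.foldl (humanStep arr) (((i % arr.length : Nat) : Int), acc)).2
        = acc + ((PySem.List.enumerate answers (i : Int)).map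
            (fun ia => if ia.2 = PySem.List.pyGetD arr (PySem.Int.mod ia.1 (arr.length : Int)) 0 then (1:Int) else 0)).sum := by
  intro answers
  induction answers with
  | nil => intro i acc; simp [PySem.List.enumerate]
  | cons a rest ih =>
    intro i acc
    set L := arr.length with hLdef
    have hmodcast : PySem.Int.mod (i : Int) (L : Int) = ((i % L : Nat) : Int) := by
      rw [PySem.Int.mod_eq_emod_of_pos (by omega)]
      omega
    have hstep : humanStep arr (((i % L : Nat) : Int), acc) a
        = ((((i + 1) % L : Nat) : Int),
           acc + (if a = PySem.List.pyGetD arr (PySem.Int.mod (i : Int) (L : Int)) 0 then (1:Int) else 0)) := by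
      unfold humanStep
      have hlt : i % L < L := Nat.mod_lt _ (by omega)
      rw [succ_mod_wrap i L hL, hmodcast]
      by_cases h : i % L = L - 1 <;> split_ifs with hc <;> simp_all <;> omega
    rw [List.foldl_cons, hstep, PySem.List.enumerate_cons, List.map_cons, List.sum_cons]
    have := ih (i + 1) (acc + (if a = PySem.List.pyGetD arr (PySem.Int.mod (i : Int) (L : Int)) 0 then (1:Int) else 0))
    rw [show ((i : Int) + 1) = ((i + 1 : Nat) : Int) by push_cast; ring] at *
    rw [this]
    ring

-- 0/1-sum over a duplicate-free index list with exactly one possible hit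
theorem sum_ite_pair (v : Int → Int) (p1 p2 : Int) :
    ∀ (rs : List Int), rs.Nodup → p1 ∈ rs →
      (rs.map (fun r => if (r, v r) = (p1, p2) then (1:Int) else 0)).sum = if p2 = v p1 then 1 else 0 := by
  intro rs
  induction rs with
  | nil => intro _ h; cases h
  | cons r t ih =>
    intro hnd hc
    have hnd' := (List.nodup_cons.mp hnd)
    rcases List.mem_cons.mp hc with h | h
    · subst h
      have ht : (t.map (fun r => if (r, v r) = (p1, p2) then (1:Int) else 0)).sum = 0 := by
        apply List.sum_eq_zero
        intro x hx
        rcases List.mem_map.mp hx with ⟨r', hr', hval⟩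
        have hne : (r', v r') ≠ (p1, p2) := by
          intro he
          injection he with he1 he2
          exact hnd'.1 (he1 ▸ hr')
        simp [hne] at hval
        omega
      have hhead : (if (p1, v p1) = (p1, p2) then (1:Int) else 0) = if p2 = v p1 then 1 else 0 := by
        by_cases h2 : p2 = v p1
        · rw [if_pos (by rw [h2]), if_pos h2]
        · rw [if_neg (by simp only [Prod.mk.injEq, true_and]; exact fun hh => h2 hh.symm), if_neg h2]
      simp only [List.map_cons, List.sum_cons, ht, hhead, add_zero]
    · have hne : (r, v r) ≠ (p1, p2) := by
        intro he
        injection he with he1 he2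
        exact hnd'.1 (he1 ▸ h)
      simp only [List.map_cons, List.sum_cons, hne, if_false, zero_add]
      simpa [hne] using ih hnd'.2 h

-- summing the histogram over all residues counts each pair at its own residue
theorem sum_count_eq (v : Int → Int) (rs : List Int) (hnd : rs.Nodup) :
    ∀ (xs : List (Int × Int)), (∀ p ∈ xs, p.1 ∈ rs) →
      (rs.map (fun r => ((xs.count (r, v r) : Nat) : Int))).sum
        = (xs.map (fun p => if p.2 = v p.1 then (1:Int) else 0)).sum := by
  intro xs
  induction xs with
  | nil => intro _; simp
  | cons p t ih =>
    intro hmem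
    have hstep : ∀ r : Int, (((p :: t).count (r, v r) : Nat) : Int)
        = ((t.count (r, v r) : Nat) : Int) + (if (r, v r) = p then (1:Int) else 0) := by
      intro r
      rw [List.count_cons]
      by_cases h : (r, v r) = p
      · simp [h, eq_comm]
      · simp [Ne.symm h, h]
    calc (rs.map (fun r => (((p :: t).count (r, v r) : Nat) : Int))).sum
        = (rs.map (fun r => ((t.count (r, v r) : Nat) : Int) + (if (r, v r) = p then (1:Int) else 0))).sum := by
          exact congrArg List.sum (List.map_congr_left (fun r _ => hstep r))
      _ = (rs.map (fun r => ((t.count (r, v r) : Nat) : Int))).sum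
            + (rs.map (fun r => if (r, v r) = p then (1:Int) else 0)).sum := by
          rw [← List.sum_map_add]
      _ = (t.map (fun q => if q.2 = v q.1 then (1:Int) else 0)).sum + (if p.2 = v p.1 then (1:Int) else 0) := by
          rw [ih (fun q hq => hmem q (List.mem_cons_of_mem _ hq)),
              show (rs.map (fun r => if (r, v r) = p then (1:Int) else 0)).sum = _ from
                (by simpa using sum_ite_pair v p.1 p.2 rs hnd (hmem p (List.mem_cons_self)))]
      _ = ((p :: t).map (fun q => if q.2 = v q.1 then (1:Int) else 0)).sum := by
          simp [List.map_cons, List.sum_cons]; ring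

-- per-pattern: B's 40 histogram lookups equal A's stateful wrap-around score
theorem score_raw (arr : List Int) (hL : 2 ≤ arr.length) (hdvd : arr.length ∣ 40) (answers : List Int) :
    ((PySem.List.pyRange 0 40 1).map
      (fun r => ((PySem.List.enumerate answers 0).foldl
        (fun d ia => d.insert (PySem.Int.mod ia.1 40, ia.2) (d.getD (PySem.Int.mod ia.1 40, ia.2) 0 + 1))
        PySem.Dict.empty).getD (r, PySem.List.pyGetD arr (PySem.Int.mod r (arr.length : Int)) 0) 0)).sum
    = (answers.foldl (humanStep arr) ((0:Int), (0:Int))).2 := by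
  have hcnt : (PySem.List.enumerate answers 0).foldl
      (fun d ia => d.insert (PySem.Int.mod ia.1 40, ia.2) (d.getD (PySem.Int.mod ia.1 40, ia.2) 0 + 1))
      PySem.Dict.empty
      = PySem.Dict.counter ((PySem.List.enumerate answers 0).map (fun ia => (PySem.Int.mod ia.1 40, ia.2))) := by
    rw [← PySem.Dict.foldl_insert_getD_add_one_eq_counter, List.foldl_map]
  rw [hcnt]
  set v : Int → Int := fun r => PySem.List.pyGetD arr (PySem.Int.mod r (arr.length : Int)) 0 with hv
  have hgetD : ∀ r : Int,
      (PySem.Dict.counter ((PySem.List.enumerate answers 0).map (fun ia => (PySem.Int.mod ia.1 40, ia.2)))).getD (r, v r) 0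
        = ((((PySem.List.enumerate answers 0).map (fun ia => (PySem.Int.mod ia.1 40, ia.2))).count (r, v r) : Nat) : Int) := by
    intro r
    exact PySem.Dict.getD_counter _ _
  rw [List.map_congr_left (fun r _ => hgetD r)]
  have hnd : (PySem.List.pyRange 0 40 1).Nodup := by decide
  have hmem : ∀ p ∈ (PySem.List.enumerate answers 0).map (fun ia => (PySem.Int.mod ia.1 40, ia.2)),
      p.1 ∈ PySem.List.pyRange 0 40 1 := by
    intro p hp
    rcases List.mem_map.mp hp with ⟨ia, _, rfl⟩
    rw [PySem.List.mem_pyRange_one]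
    exact ⟨PySem.Int.mod_nonneg _ (by omega), PySem.Int.mod_lt _ (by omega)⟩
  rw [sum_count_eq v _ hnd _ hmem, List.map_map]
  have hper : ∀ p ∈ PySem.List.enumerate answers 0,
      ((fun q : Int × Int => if q.2 = v q.1 then (1:Int) else 0) ∘ (fun ia => (PySem.Int.mod ia.1 40, ia.2))) p
        = (fun ia : Int × Int => if ia.2 = PySem.List.pyGetD arr (PySem.Int.mod ia.1 (arr.length : Int)) 0 then (1:Int) else 0) p := by
    intro p hp
    rcases (PySem.List.mem_enumerate_iff answers 0 p).mp hp with ⟨k, hk, rfl⟩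
    simp only [Function.comp, hv]
    have h40 : PySem.Int.mod ((0 : Int) + (k : Int)) 40 = ((k % 40 : Nat) : Int) := by
      rw [zero_add]
      exact_mod_cast PySem.Int.mod_natCast k 40
    have hL40 : PySem.Int.mod (((k % 40 : Nat) : Int)) (arr.length : Int) = ((k % arr.length : Nat) : Int) := by
      rw [PySem.Int.mod_natCast]
      congr 1
      exact Nat.mod_mod_of_dvd k hdvd
    have hLk : PySem.Int.mod ((0 : Int) + (k : Int)) (arr.length : Int) = ((k % arr.length : Nat) : Int) := by
      rw [zero_add]
      exact PySem.Int.mod_natCast k arr.length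
    rw [h40, hL40, hLk]
  rw [List.map_congr_left hper]
  have := human_run arr hL answers 0 0
  simp only [Nat.zero_mod, Nat.cast_zero, zero_add] at this
  rw [← this]

-- each humanStep score is a sum of 0/1 indicators, hence nonnegative
theorem human_nonneg (arr : List Int) (hL : 2 ≤ arr.length) (answers : List Int) :
    0 ≤ (answers.foldl (humanStep arr) ((0:Int), (0:Int))).2 := by
  have := human_run arr hL answers 0 0
  simp only [Nat.zero_mod, Nat.cast_zero, zero_add] at this
  rw [this]
  apply List.sum_nonneg
  intro x hx
  rcases List.mem_map.mp hx with ⟨ia, _, rfl⟩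
  split <;> omega

-- both winner selections agree on any three nonnegative scores
set_option maxHeartbeats 1000000 in
theorem select_eq (s1 s2 s3 : Int) (h1 : 0 ≤ s1) (h2 : 0 ≤ s2) (h3 : 0 ≤ s3) :
    (let answerList : List Int := [s1, s2, s3]
     let maxScore : Int := (PySem.List.pyRange 0 3 1).foldl
       (fun m i => if m < PySem.List.pyGetD answerList i 0 then PySem.List.pyGetD answerList i 0 else m) 0
     (PySem.List.pyRange 0 3 1).foldl
       (fun acc i => if maxScore = PySem.List.pyGetD answerList i 0 then acc ++ [i + 1] else acc) [])
    = (let scores : List Int := [s1, s2, s3]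
       let best : Int := (PySem.List.max? scores (fun x => x)).getD 0
       ((PySem.List.enumerate scores 0).filter (fun q => q.2 = best)).map (fun q => q.1 + 1)) := by
  have hr : PySem.List.pyRange 0 3 1 = [0, 1, 2] := by decide
  have hm : (PySem.List.max? [s1, s2, s3] (fun x => x)).getD 0 = max (max s1 s2) s3 := by
    rw [PySem.List.max?_id_cons]; simp [List.foldl, max_assoc]
  have he : PySem.List.enumerate [s1, s2, s3] (0 : Int) = [(0, s1), (1, s2), (2, s3)] := by
    simp [PySem.List.enumerate_cons]
  have hmx : (if (if (if (0:Int) < s1 then s1 else 0) < s2 then s2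
        else if (0:Int) < s1 then s1 else 0) < s3 then s3
      else if (if (0:Int) < s1 then s1 else 0) < s2 then s2 else if (0:Int) < s1 then s1 else 0)
      = max (max s1 s2) s3 := by split_ifs <;> omega
  simp only [hr, hm, he, List.foldl, PySem.List.pyGetD_ofNat',
    List.getD_cons_zero, List.getD_cons_succ]
  rw [hmx]
  simp only [List.filter_cons, List.filter_nil, decide_eq_true_eq, List.nil_append]
  split_ifs <;> first | rfl | omega

-- ===== VERDICT (by name: the statement is the Claim_ definition above) =====
theorem solution_spec : Claim_equal_solution := by
  intro answers _
  unfold Spec_solution solution solution_alt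
  rw [triple_fold]
  simp only [List.map]
  simp only [score_raw [1,2,3,4,5] (by norm_num) (by norm_num),
      score_raw [2,1,2,3,2,4,2,5] (by norm_num) (by norm_num),
      score_raw [3,3,1,1,2,2,4,4,5,5] (by norm_num) (by norm_num)]
  exact select_eq _ _ _ (human_nonneg _ (by norm_num) _) (human_nonneg _ (by norm_num) _)
    (human_nonneg _ (by norm_num) _)
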